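-- pv_equiv track=rewrite | github.com/Anandhitha20/usb-pd-parser | validate_and_report.py | process_parent_group
-- ===== SOURCE A (Python) =====
-- from typing import Dict, List, Tuple, Optional
--
-- def get_numeric_last_component(section_id: str) -> int:
--     """Extract the numeric last component of a section ID."""
--     try:
--         return int(section_id.split(".")[-1])
--     except (ValueError, IndexError):
--         return -1
--
-- def find_missing_numbers_in_sequence(nums: List[int]) -> List[int]:
--     """Find missing numbers in a sequence."""
--     if not nums:
--         return []
--
--     expected = list(range(nums[0], nums[-1] + 1))
--     return [n for n in expected if n not in nums]
--
-- def process_parent_group(parent: str, children: List[str]) -> Optional[Tuple[str, str]]: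
--     """Process a single parent group to find gaps."""
--     if len(children) < 2:
--         return None
--
--     # Only consider same-depth children
--     depth = len(children[0].split(".")) if children else 0
--     same_depth = [c for c in children if len(c.split(".")) == depth]
--
--     if len(same_depth) < 2:
--         return None
--
--     # Sort by numeric last component
--     same_depth.sort(key=get_numeric_last_component)
--     nums = [
--         get_numeric_last_component(s) for s in same_depth
--         if get_numeric_last_component(s) >= 0
--     ]
--     nums = [
--         get_numeric_last_component(s) for s in same_depth
--         if get_numeric_last_component(s) >= 0
--     ]
--
--     if not nums:
--         return None
--
--     missing_nums = find_missing_numbers_in_sequence(nums)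
--     if not missing_nums:
--         return None
--
--     missing_ids = [
--         f"{parent}.{n}" if parent != "<root>" else str(n)
--         for n in missing_nums
--     ]
--     missing_ids = [
--         f"{parent}.{n}" if parent != "<root>" else str(n)
--         for n in missing_nums
--     ]
--
--     parent_label = parent if parent != "<root>" else "<top-level>"
--     gap_description = ", ".join(missing_ids)
--     gap_description = ", ".join(missing_ids)
--
--     return (parent_label, gap_description)
-- ===== SOURCE B (Python) =====
-- def _last_num(section_id):
--     try:
--         return int(section_id.split(".")[-1])
--     except ValueError:
--         return -1
--
-- def process_parent_group(parent, children):
--     """One pass collecting same-depth count and numeric values, sort the ints,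
--     then emit gaps from adjacent pairs instead of range+membership scanning."""
--     if len(children) < 2:
--         return None
--     depth = len(children[0].split("."))
--     cnt = 0
--     vals = []
--     for c in children:
--         if len(c.split(".")) == depth:
--             cnt += 1
--             v = _last_num(c)
--             if v >= 0:
--                 vals.append(v)
--     if cnt < 2 or not vals:
--         return None
--     nums = sorted(vals)
--     gaps = [m for a, b in zip(nums, nums[1:]) for m in range(a + 1, b)]
--     if not gaps:
--         return None
--     prefix = "" if parent == "<root>" else parent + "."
--     label = "<top-level>" if parent == "<root>" else parent
--     return (label, ", ".join(prefix + str(m) for m in gaps))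
-- ===== Notes on version B (the rewrite author's own statement) =====
-- stated objective: faster
-- what changed: Replaces A's key-sort of the id strings plus full-range-with-membership gap scan (and A's duplicated statements) by a single collecting pass over the children, a plain integer sort, and emission of each gap from adjacent pairs of the sorted numbers.
import Mathlib
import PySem

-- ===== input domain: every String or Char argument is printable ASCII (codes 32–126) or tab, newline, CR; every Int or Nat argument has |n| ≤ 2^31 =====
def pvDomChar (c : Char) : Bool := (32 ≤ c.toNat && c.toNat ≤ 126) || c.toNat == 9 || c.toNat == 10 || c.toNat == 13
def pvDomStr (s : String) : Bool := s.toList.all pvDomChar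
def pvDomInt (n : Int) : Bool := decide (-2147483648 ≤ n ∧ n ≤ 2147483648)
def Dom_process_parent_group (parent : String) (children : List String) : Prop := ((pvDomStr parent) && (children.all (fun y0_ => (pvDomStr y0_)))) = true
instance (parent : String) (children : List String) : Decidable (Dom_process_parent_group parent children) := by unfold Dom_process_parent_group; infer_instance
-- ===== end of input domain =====

-- B replaces A's full-range + membership scan (and its duplicated statements) by a single
-- collecting pass over the children, an integer sort, and adjacent-pair gap emission.

-- ===== PORT A =====
def get_numeric_last_component (section_id : String) : Int :=
  -- int(section_id.split(".")[-1]), -1 on ValueError/IndexError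
  match PySem.List.pyGet? (PySem.Chars.splitOn section_id.toList ['.']) (-1) with
  | some cs => (PySem.Int.ofChars? cs).getD (-1)
  | none => -1

def find_missing_numbers_in_sequence (nums : List Int) : List Int :=
  if nums.isEmpty then []
  else
    let expected := PySem.List.pyRange (PySem.List.pyGetD nums 0 0) (PySem.List.pyGetD nums (-1) 0 + 1)
    expected.filter (fun n => !nums.contains n)

def process_parent_group (parent : String) (children : List String) : Option (String × String) :=
  if children.length < 2 then none else
  let depth : Nat := match children with
    | [] => 0
    | c :: _ => (PySem.Chars.splitOn c.toList ['.']).length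
  let same_depth := children.filter (fun c => (PySem.Chars.splitOn c.toList ['.']).length == depth)
  if same_depth.length < 2 then none else
  let same_depth := PySem.List.sorted same_depth get_numeric_last_component false
  let nums := (same_depth.filter (fun s => 0 ≤ get_numeric_last_component s)).map get_numeric_last_component
  let nums := (same_depth.filter (fun s => 0 ≤ get_numeric_last_component s)).map get_numeric_last_component
  if nums.isEmpty then none else
  let missing_nums := find_missing_numbers_in_sequence nums
  if missing_nums.isEmpty then none else
  let missing_ids := missing_nums.map (fun n =>
    if parent ≠ "<root>" then parent ++ "." ++ PySem.Int.toStr n else PySem.Int.toStr n)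
  let missing_ids := missing_nums.map (fun n =>
    if parent ≠ "<root>" then parent ++ "." ++ PySem.Int.toStr n else PySem.Int.toStr n)
  let parent_label := if parent ≠ "<root>" then parent else "<top-level>"
  let gap_description := PySem.Str.join ", " missing_ids
  let gap_description := PySem.Str.join ", " missing_ids
  some (parent_label, gap_description)

-- ===== PORT B =====
def pvLastNum (section_id : String) : Int :=
  -- _last_num: split never yields [], so the last component always exists
  match (PySem.Chars.splitOn section_id.toList ['.']).getLast? with
  | some cs => (PySem.Int.ofChars? cs).getD (-1)
  | none => -1

-- the collecting loop of B: same-depth count and the nonnegative numeric values, one pass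
def pvCollect (depth : Nat) (cs : List String) (st : Nat × List Int) : Nat × List Int :=
  match cs with
  | [] => st
  | c :: rest =>
    if (PySem.Chars.splitOn c.toList ['.']).length == depth then
      let v := pvLastNum c
      pvCollect depth rest (st.1 + 1, if 0 ≤ v then st.2 ++ [v] else st.2)
    else pvCollect depth rest st

def process_parent_group_alt (parent : String) (children : List String) : Option (String × String) :=
  match children with
  | c0 :: c1 :: rest =>
    let depth := (PySem.Chars.splitOn c0.toList ['.']).length
    let st := pvCollect depth (c0 :: c1 :: rest) (0, [])
    if st.1 < 2 ∨ st.2.isEmpty then none else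
    let nums := PySem.List.sorted st.2 (fun x => x) false
    let gaps := (nums.zip nums.tail).flatMap (fun ab => PySem.List.pyRange (ab.1 + 1) ab.2)
    if gaps.isEmpty then none else
    let pre := if parent = "<root>" then "" else parent ++ "."
    let label := if parent = "<root>" then "<top-level>" else parent
    some (label, PySem.Str.join ", " (gaps.map (fun m => pre ++ PySem.Int.toStr m)))
  | _ => none

-- ===== PRECONDITION & SPEC =====
def Spec_process_parent_group (parent : String) (children : List String) (out : Option (String × String)) : Prop := out = process_parent_group_alt parent children
instance (parent : String) (children : List String) (out : Option (String × String)) : Decidable (Spec_process_parent_group parent children out) := by unfold Spec_process_parent_group; infer_instance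

-- ===== CLAIM (what is proved, stated in full; the proofs are below) =====
def Claim_equal_process_parent_group : Prop := ∀ (parent : String) (children : List String), Dom_process_parent_group parent children → Spec_process_parent_group parent children (process_parent_group parent children)

-- ===== LEMMAS AND PROOFS =====

lemma pvLastNum_eq (s : String) : pvLastNum s = get_numeric_last_component s := by
  simp [pvLastNum, get_numeric_last_component, PySem.List.pyGet?_neg_one]

lemma pvCollect_eq (depth : Nat) (cs : List String) (n : Nat) (acc : List Int) :
    pvCollect depth cs (n, acc) =
      (n + (cs.filter (fun c => (PySem.Chars.splitOn c.toList ['.']).length == depth)).length,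
       acc ++ ((cs.filter (fun c => (PySem.Chars.splitOn c.toList ['.']).length == depth)).map
                 get_numeric_last_component).filter (fun v => decide (0 ≤ v))) := by
  induction cs generalizing n acc with
  | nil => simp [pvCollect]
  | cons c rest ih =>
    by_cases h : ((PySem.Chars.splitOn c.toList ['.']).length == depth) = true
    · simp only [pvCollect, h, if_true, pvLastNum_eq, ih, List.filter_cons, List.map_cons]
      by_cases hv : (0 : Int) ≤ get_numeric_last_component c <;>
        simp [hv] <;> omega
    · simp [pvCollect, h, ih]

-- gap scan on a nondecreasing list equals range-minus-membership
lemma gaps_eq : ∀ (t : List Int) (a : Int), (a :: t).Pairwise (· ≤ ·) →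
    (PySem.List.pyRange a ((a :: t).getLast (by simp) + 1)).filter (fun n => !((a :: t).contains n))
      = ((a :: t).zip t).flatMap (fun ab => PySem.List.pyRange (ab.1 + 1) ab.2) := by
  intro t
  induction t with
  | nil =>
    intro a _
    simp [PySem.List.pyRange_one_singleton]
  | cons b t' ih =>
    intro a hp
    have hab : a ≤ b := (List.pairwise_cons.mp hp).1 b (by simp)
    have hp' : (b :: t').Pairwise (· ≤ ·) := (List.pairwise_cons.mp hp).2
    have hbt' : ∀ x ∈ t', b ≤ x := fun x hx => (List.pairwise_cons.mp hp').1 x hx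
    have hL : b ≤ (b :: t').getLast (by simp) := by
      rcases List.mem_cons.mp (List.getLast_mem (l := b :: t') (by simp)) with h | h
      · omega
      · exact hbt' _ h
    have hlast : (a :: b :: t').getLast (by simp) = (b :: t').getLast (by simp) :=
      List.getLast_cons (by simp)
    rw [hlast, PySem.List.pyRange_one_append a b _ hab (by omega), List.filter_append]
    have part1 : (PySem.List.pyRange a b).filter (fun n => !((a :: b :: t').contains n))
        = PySem.List.pyRange (a + 1) b := by
      by_cases h : b ≤ a
      · rw [PySem.List.pyRange_one_eq_nil h, PySem.List.pyRange_one_eq_nil (by omega)]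
        simp
      · rw [PySem.List.pyRange_one_cons (by omega)]
        rw [List.filter_cons]
        simp only [List.contains_cons, beq_self_eq_true, Bool.true_or, Bool.not_true,
          Bool.false_eq_true, if_false]
        apply List.filter_eq_self.mpr
        intro x hx
        have hx' := PySem.List.mem_pyRange_one.mp hx
        simp only [Bool.not_eq_true', Bool.or_eq_false_iff, beq_eq_false_iff_ne]
        refine ⟨by omega, by omega, ?_⟩
        rw [List.contains_eq_mem]
        simp only [decide_eq_false_iff_not]
        intro hmem
        have := hbt' x hmem
        omega
    have part2 : (PySem.List.pyRange b ((b :: t').getLast (by simp) + 1)).filter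
          (fun n => !((a :: b :: t').contains n))
        = ((b :: t').zip t').flatMap (fun ab => PySem.List.pyRange (ab.1 + 1) ab.2) := by
      rw [← ih b hp']
      apply List.filter_congr
      intro x hx
      have hx' := PySem.List.mem_pyRange_one.mp hx
      simp only [List.contains_cons]
      by_cases hxa : x = a
      · have hba : a = b := by omega
        subst hxa
        simp [hba]
      · simp [hxa]
    rw [part1, part2]
    rfl

lemma find_missing_eq (N : List Int) (hp : N.Pairwise (· ≤ ·)) (hne : N ≠ []) :
    find_missing_numbers_in_sequence N
      = (N.zip N.tail).flatMap (fun ab => PySem.List.pyRange (ab.1 + 1) ab.2) := by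
  match N with
  | [] => exact absurd rfl hne
  | a :: t =>
    unfold find_missing_numbers_in_sequence
    rw [if_neg (by simp)]
    rw [PySem.List.pyGetD_zero_cons, PySem.List.pyGetD_neg_one _ _ (by simp)]
    exact gaps_eq t a hp

-- ===== VERDICT (by name: the statement is the Claim_ definition above) =====
theorem process_parent_group_spec : Claim_equal_process_parent_group := by
  intro parent children _
  unfold Spec_process_parent_group
  match children with
  | [] => rfl
  | [c] => rfl
  | c0 :: c1 :: rest =>
    simp only [process_parent_group, process_parent_group_alt]
    rw [if_neg (by simp)]
    rw [pvCollect_eq]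
    simp only [Nat.zero_add, List.nil_append]
    set p : String → Bool := fun c => (PySem.Chars.splitOn c.toList ['.']).length ==
      (PySem.Chars.splitOn c0.toList ['.']).length with hp
    set sd := (c0 :: c1 :: rest).filter p with hsd
    set key := get_numeric_last_component with hkey
    set vals := (sd.map key).filter (fun v => decide (0 ≤ v)) with hvals
    by_cases hlen : sd.length < 2
    · rw [if_pos hlen, if_pos (Or.inl (by simpa using hlen))]
    · rw [if_neg hlen]
      -- A's nums equals B's sorted vals
      have hnums : (((PySem.List.sorted sd key).filter (fun s => 0 ≤ key s)).map key)
          = PySem.List.sorted vals (fun x => x) := by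
        refine (PySem.List.sorted_id_eq_of_perm_of_pairwise vals _ ?_ ?_).symm
        · rw [hvals, List.filter_map (f := key)]
          exact ((PySem.List.sorted_perm sd key false).filter _).map key
        · have h1 : (PySem.List.sorted sd key).Pairwise (fun a b => key a ≤ key b) :=
            PySem.List.sorted_pairwise sd key
          have h2 := (h1.filter (fun s => decide (0 ≤ key s))).map key (by intro a b h; exact h)
          exact h2
      rw [hnums]
      by_cases hv : vals.isEmpty
      · rw [if_pos (by simpa [PySem.List.sorted_eq_nil_iff, List.isEmpty_iff] using hv),
          if_pos (Or.inr hv)]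
      · have hg2 : ¬(sd.length < 2 ∨ vals.isEmpty = true) := not_or.mpr ⟨hlen, hv⟩
        rw [if_neg (by simpa [PySem.List.sorted_eq_nil_iff, List.isEmpty_iff] using hv),
          if_neg hg2]
        have hNne : PySem.List.sorted vals (fun x => x) ≠ [] := by
          simpa [PySem.List.sorted_eq_nil_iff, List.isEmpty_iff] using hv
        have hNp : (PySem.List.sorted vals (fun x => x)).Pairwise (· ≤ ·) :=
          PySem.List.sorted_pairwise vals (fun x => x)
        rw [find_missing_eq _ hNp hNne]
        set G := ((PySem.List.sorted vals fun x => x).zip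
            (PySem.List.sorted vals fun x => x).tail).flatMap
            (fun ab => PySem.List.pyRange (ab.1 + 1) ab.2) with hG
        by_cases hg : G = []
        · rw [if_pos (show G.isEmpty = true by simpa using hg)]
          simp [hg]
        · rw [if_neg (show ¬G.isEmpty = true by simpa using hg),
            if_neg (show ¬G.isEmpty = true by simpa using hg)]
          by_cases hr : parent = "<root>"
          · simp [hr]
          · simp [hr]
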